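-- pv_equiv track=rewrite | github.com/ericsliu/st-2 | uma_trainer/decision/summer_planner.py | _pick_drink
-- ===== SOURCE A (Python) =====
-- DRINK_OVERSHOOT_ALLOWANCE = 5  # tolerate this much overshoot past 100%
--
-- DRINK_VALUES: dict[str, int] = {"vita_65": 65, "vita_40": 40, "vita_20": 20}
--
-- def _pick_drink(energy: int, inventory: dict[str, int]) -> str | None:
--     """Pick the biggest drink that fits within energy headroom.
--
--     Falls back to the smallest held drink if all overshoot.
--     """
--     held = [(k, v) for k, v in DRINK_VALUES.items() if inventory.get(k, 0) > 0]
--     if not held: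
--         return None
--     held.sort(key=lambda d: -d[1])  # biggest first
--     for key, val in held:
--         if energy + val <= 100 + DRINK_OVERSHOOT_ALLOWANCE:
--             return key
--     return held[-1][0]  # smallest — overshoot accepted
-- ===== SOURCE B (Python) =====
-- DRINK_OVERSHOOT_ALLOWANCE = 5  # tolerate this much overshoot past 100%
--
-- DRINK_VALUES: dict[str, int] = {"vita_65": 65, "vita_40": 40, "vita_20": 20}
--
--
-- def _pick_drink(energy: int, inventory: dict[str, int]) -> str | None:
--     """Pick the biggest drink that fits within energy headroom.
--
--     Falls back to the smallest held drink if all overshoot.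
--     """
--     held = {k: v for k, v in DRINK_VALUES.items() if inventory.get(k, 0) > 0}
--     if not held:
--         return None
--     fitting = {k: v for k, v in held.items()
--                if energy + v <= 100 + DRINK_OVERSHOOT_ALLOWANCE}
--     if fitting:
--         return max(fitting, key=fitting.get)
--     return min(held, key=held.get)
-- ===== Notes on version B (the rewrite author's own statement) =====
-- stated objective: idiomatic
-- what changed: B drops A's descending sort and first-fit scan: it builds the held dict, filters the drinks that fit the energy headroom, and returns max of the fitting subset by value, else min of all held by value.
import Mathlib
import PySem

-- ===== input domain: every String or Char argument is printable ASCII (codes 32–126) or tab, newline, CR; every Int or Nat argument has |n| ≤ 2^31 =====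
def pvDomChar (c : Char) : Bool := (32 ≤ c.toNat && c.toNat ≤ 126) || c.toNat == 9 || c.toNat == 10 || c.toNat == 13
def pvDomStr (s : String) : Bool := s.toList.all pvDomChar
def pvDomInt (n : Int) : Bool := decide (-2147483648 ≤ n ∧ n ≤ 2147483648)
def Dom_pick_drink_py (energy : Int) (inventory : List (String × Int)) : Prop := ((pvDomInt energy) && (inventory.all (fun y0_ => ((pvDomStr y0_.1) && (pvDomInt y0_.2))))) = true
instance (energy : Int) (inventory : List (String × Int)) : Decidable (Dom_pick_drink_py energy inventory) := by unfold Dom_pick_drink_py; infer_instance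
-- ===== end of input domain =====

-- B replaces A's sort-then-first-fit scan by filter + max/min selection (idiomatic decomposition, same cost).

-- ===== PORT A =====
def DRINK_OVERSHOOT_ALLOWANCE : Int := 5

def DRINK_VALUES : List (String × Int) := [("vita_65", 65), ("vita_40", 40), ("vita_20", 20)]

-- the 'for key, val in held: if … return key' loop of A
def pickLoopA (energy : Int) : List (String × Int) → Option String
  | [] => none
  | (k, v) :: rest =>
      if energy + v ≤ 100 + DRINK_OVERSHOOT_ALLOWANCE then some k else pickLoopA energy rest

def pick_drink_py (energy : Int) (inventory : List (String × Int)) : Option String :=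
  let held := DRINK_VALUES.filter (fun kv => PySem.Dict.getD (PySem.Dict.mk inventory) kv.1 (0:Int) > 0)
  if held.isEmpty then none
  else
    let held := PySem.List.sorted held (fun d => -d.2)  -- held.sort(key=lambda d: -d[1])
    match pickLoopA energy held with
    | some k => some k
    | none => (held.getLast?).map Prod.fst  -- held[-1][0]

-- ===== PORT B =====
def pick_drink_py_alt (energy : Int) (inventory : List (String × Int)) : Option String :=
  let held := DRINK_VALUES.filter (fun kv => PySem.Dict.getD (PySem.Dict.mk inventory) kv.1 (0:Int) > 0)
  if held.isEmpty then none
  else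
    let fitting := held.filter (fun kv => energy + kv.2 ≤ 100 + DRINK_OVERSHOOT_ALLOWANCE)
    if ¬ fitting.isEmpty then
      (PySem.List.max? fitting (fun kv => kv.2)).map Prod.fst  -- max(fitting, key=fitting.get)
    else
      (PySem.List.min? held (fun kv => kv.2)).map Prod.fst  -- min(held, key=held.get)

-- ===== PRECONDITION & SPEC =====
def Spec_pick_drink_py (energy : Int) (inventory : List (String × Int)) (out : Option String) : Prop := out = pick_drink_py_alt energy inventory
instance (energy : Int) (inventory : List (String × Int)) (out : Option String) : Decidable (Spec_pick_drink_py energy inventory out) := by unfold Spec_pick_drink_py; infer_instance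

-- ===== CLAIM (what is proved, stated in full; the proofs are below) =====
def Claim_equal_pick_drink_py : Prop := ∀ (energy : Int) (inventory : List (String × Int)), Dom_pick_drink_py energy inventory → Spec_pick_drink_py energy inventory (pick_drink_py energy inventory)

-- ===== LEMMAS AND PROOFS =====

-- ===== VERDICT (by name: the statement is the Claim_ definition above) =====
set_option maxHeartbeats 2000000 in
theorem pick_drink_py_spec : Claim_equal_pick_drink_py := by
  intro energy inventory _
  unfold Spec_pick_drink_py pick_drink_py pick_drink_py_alt
  simp only [DRINK_VALUES, DRINK_OVERSHOOT_ALLOWANCE, List.filter]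
  rcases h65 : decide (PySem.Dict.getD (PySem.Dict.mk inventory) "vita_65" (0:Int) > 0) with _ | _ <;>
  rcases h40 : decide (PySem.Dict.getD (PySem.Dict.mk inventory) "vita_40" (0:Int) > 0) with _ | _ <;>
  rcases h20 : decide (PySem.Dict.getD (PySem.Dict.mk inventory) "vita_20" (0:Int) > 0) with _ | _ <;>
  by_cases e65 : energy + 65 ≤ 105 <;>
  by_cases e40 : energy + 40 ≤ 105 <;>
  by_cases e20 : energy + 20 ≤ 105 <;>
  simp [pickLoopA, PySem.List.sorted, PySem.List.insertBy, PySem.List.max?, PySem.List.min?,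
    DRINK_OVERSHOOT_ALLOWANCE, e65, e40, e20]
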